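-- pv_equiv track=rewrite | github.com/Insoleet/wot_stories | wot_stories/fast_wot.py | ySentries
-- ===== SOURCE A (Python) =====
-- def ySentries(N):
--     Y = {
--         10: 2,
--         100: 4,
--         1000: 6,
--         10000: 12,
--         100000: 20
--     }
--     for k in reversed(sorted(Y.keys())):
--         if N >= k:
--             return Y[k]
--     return 0
-- ===== SOURCE B (Python) =====
-- def ySentries(N):
--     thresholds = [10, 100, 1000, 10000, 100000]
--     values = [2, 4, 6, 12, 20]
--     lo, hi = 0, len(thresholds)
--     while lo < hi:
--         mid = (lo + hi) // 2
--         if N < thresholds[mid]: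
--             hi = mid
--         else:
--             lo = mid + 1
--     return values[lo - 1] if lo > 0 else 0
-- ===== Notes on version B (the rewrite author's own statement) =====
-- stated objective: alternative
-- what changed: Replaces the dict plus sorted/reversed linear scan with a binary search (bisect_right by hand) over an ascending threshold table paired with a values table.
import Mathlib
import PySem

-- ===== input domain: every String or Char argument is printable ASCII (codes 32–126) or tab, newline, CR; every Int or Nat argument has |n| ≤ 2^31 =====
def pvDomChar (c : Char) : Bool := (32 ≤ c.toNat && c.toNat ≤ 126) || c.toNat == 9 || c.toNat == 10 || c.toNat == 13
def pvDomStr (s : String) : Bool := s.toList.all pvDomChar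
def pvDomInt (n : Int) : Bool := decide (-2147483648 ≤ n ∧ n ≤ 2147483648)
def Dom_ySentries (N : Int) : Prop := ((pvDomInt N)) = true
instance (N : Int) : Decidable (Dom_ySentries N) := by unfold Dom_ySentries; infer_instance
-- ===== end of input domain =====

-- B replaces A's descending linear scan over a sorted dict with a hand-written
-- bisect_right binary search over ascending parallel tables (alternative structure).

-- ===== PORT A =====
-- the 'for k in reversed(sorted(Y.keys())): if N >= k: return Y[k]' loop; Y[k]
-- is ported as (Y.get? k).getD 0 — k always comes from Y.keys, so no KeyError
def ySentriesGo (Y : PySem.Dict Int Int) (N : Int) : List Int → Int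
  | [] => 0
  | k :: ks => if N ≥ k then (Y.get? k).getD 0 else ySentriesGo Y N ks

def ySentries (N : Int) : Int :=
  let Y : PySem.Dict Int Int :=
    PySem.Dict.ofList [(10, 2), (100, 4), (1000, 6), (10000, 12), (100000, 20)]
  ySentriesGo Y N ((PySem.List.sorted Y.keys (fun x => x) false).reverse)

-- ===== PORT B =====
-- the 'while lo < hi' binary-search loop of Source B; thresholds[mid] is ported as
-- getD (mid is always in range since lo < hi ≤ length)
def ySentriesBS (thr : List Int) (N : Int) (lo hi : Nat) : Nat :=
  if lo < hi then
    let mid := (lo + hi) / 2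
    if N < thr.getD mid 0 then ySentriesBS thr N lo mid
    else ySentriesBS thr N (mid + 1) hi
  else lo
termination_by hi - lo
decreasing_by all_goals omega

def ySentries_alt (N : Int) : Int :=
  let thresholds : List Int := [10, 100, 1000, 10000, 100000]
  let values : List Int := [2, 4, 6, 12, 20]
  let lo := ySentriesBS thresholds N 0 thresholds.length
  if lo > 0 then values.getD (lo - 1) 0 else 0

-- ===== PRECONDITION & SPEC =====
def Spec_ySentries (N : Int) (out : Int) : Prop := out = ySentries_alt N
instance (N : Int) (out : Int) : Decidable (Spec_ySentries N out) := by unfold Spec_ySentries; infer_instance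

-- ===== CLAIM (what is proved, stated in full; the proofs are below) =====
def Claim_equal_ySentries : Prop := ∀ (N : Int), Dom_ySentries N → Spec_ySentries N (ySentries N)

-- ===== LEMMAS AND PROOFS =====
theorem ySentries_eq_alt (N : Int) : ySentries N = ySentries_alt N := by
  have hA : ySentries N = ySentriesGo (PySem.Dict.ofList [(10,2),(100,4),(1000,6),(10000,12),(100000,20)]) N [100000,10000,1000,100,10] := rfl
  rw [hA]
  simp only [ySentriesGo]
  simp only [ySentries_alt, List.length_cons, List.length_nil]
  rw [ySentriesBS.eq_def]; norm_num
  rw [ySentriesBS.eq_def, ySentriesBS.eq_def]; norm_num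
  rw [ySentriesBS.eq_def, ySentriesBS.eq_def, ySentriesBS.eq_def, ySentriesBS.eq_def]; norm_num
  have h10 : ((PySem.Dict.ofList [((10:Int),(2:Int)),(100,4),(1000,6),(10000,12),(100000,20)]).get? 10).getD 0 = 2 := by decide
  have h100 : ((PySem.Dict.ofList [((10:Int),(2:Int)),(100,4),(1000,6),(10000,12),(100000,20)]).get? 100).getD 0 = 4 := by decide
  have h1000 : ((PySem.Dict.ofList [((10:Int),(2:Int)),(100,4),(1000,6),(10000,12),(100000,20)]).get? 1000).getD 0 = 6 := by decide
  have h10000 : ((PySem.Dict.ofList [((10:Int),(2:Int)),(100,4),(1000,6),(10000,12),(100000,20)]).get? 10000).getD 0 = 12 := by decide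
  have h100000 : ((PySem.Dict.ofList [((10:Int),(2:Int)),(100,4),(1000,6),(10000,12),(100000,20)]).get? 100000).getD 0 = 20 := by decide
  rw [h10, h100, h1000, h10000, h100000]
  have hstop : ∀ (thr : List Int) (k : Nat), ySentriesBS thr N k k = k := by
    intro thr k; rw [ySentriesBS.eq_def]; simp
  split_ifs <;> simp_all <;> omega

-- ===== VERDICT (by name: the statement is the Claim_ definition above) =====
theorem ySentries_spec : Claim_equal_ySentries := by
  intro N _
  exact ySentries_eq_alt N
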